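-- pv_equiv track=rewrite | github.com/mkadie/T-Rex_talker_interactive | upstream_patches/config_reader.py | apply_config
-- ===== SOURCE A (Python) =====
-- def apply_config(hw_config, user_config):
--     """Overlay user config values onto hardware config dict.
--
--     Only applies keys that are recognized user-configurable settings.
--     Returns the modified hw_config.
--     """
--     allowed = {
--         "sleep_enabled",
--         "sleep_timeout",
--         "volume",
--         "playback_speed",
--         "debounce_time",
--         "encoder_direction_flip",
--         "rotary_encoder",
--         "encoder_navigation",
--         "play_on_release",
--         "show_border",
--         "display_hint_text",
--         "zoom_image_enabled",
--         "start_menu",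
--         "emergency_push_enabled",
--         "emergency_push_sound",
--         "emergency_hold_enabled",
--         "emergency_hold_seconds",
--         # Subprogram boot — "mode = stim_games/aac_trainer.py" tells the
--         # Machine to launch that subprogram after hardware init instead
--         # of (or in addition to) showing the start_menu. When the
--         # subprogram exits, control falls through to the menu loop.
--         "mode",
--     }
--
--     for key, val in user_config.items():
--         if key in allowed:
--             hw_config[key] = val
--
--     return hw_config
-- ===== SOURCE B (Python) =====
-- _ALLOWED = frozenset({
--     "sleep_enabled", "sleep_timeout", "volume", "playback_speed",
--     "debounce_time", "encoder_direction_flip", "rotary_encoder",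
--     "encoder_navigation", "play_on_release", "show_border",
--     "display_hint_text", "zoom_image_enabled", "start_menu",
--     "emergency_push_enabled", "emergency_push_sound",
--     "emergency_hold_enabled", "emergency_hold_seconds", "mode",
-- })
--
--
-- def apply_config(hw_config, user_config):
--     """Overlay user config values onto hardware config dict.
--
--     Two-stage construction instead of a single in-place loop over the user
--     items: stage 1 rebuilds the hardware entries, substituting the user's
--     value wherever the key is a recognized override; stage 2 collects the
--     recognized user settings that are new to the hardware config.  The two
--     parts have disjoint keys, so merging them yields exactly the overlaid
--     dict.  Returns a fresh dict (hw_config is NOT mutated, unlike the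
--     original); the returned mapping is identical.
--     """
--     overridden = {k: (user_config[k] if k in _ALLOWED and k in user_config else v)
--                   for k, v in hw_config.items()}
--     additions = {k: v for k, v in user_config.items()
--                  if k in _ALLOWED and k not in hw_config}
--     return {**overridden, **additions}
-- ===== Notes on version B (the rewrite author's own statement) =====
-- stated objective: alternative
-- what changed: B builds a fresh result in two staged comprehensions - the hardware entries with recognized user overrides substituted (iterating hw_config), then the recognized user-only settings appended - and merges them, instead of A's single in-place assignment loop over user_config items; equivalence is about the return value (B does not mutate hw_config).
import Mathlib
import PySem

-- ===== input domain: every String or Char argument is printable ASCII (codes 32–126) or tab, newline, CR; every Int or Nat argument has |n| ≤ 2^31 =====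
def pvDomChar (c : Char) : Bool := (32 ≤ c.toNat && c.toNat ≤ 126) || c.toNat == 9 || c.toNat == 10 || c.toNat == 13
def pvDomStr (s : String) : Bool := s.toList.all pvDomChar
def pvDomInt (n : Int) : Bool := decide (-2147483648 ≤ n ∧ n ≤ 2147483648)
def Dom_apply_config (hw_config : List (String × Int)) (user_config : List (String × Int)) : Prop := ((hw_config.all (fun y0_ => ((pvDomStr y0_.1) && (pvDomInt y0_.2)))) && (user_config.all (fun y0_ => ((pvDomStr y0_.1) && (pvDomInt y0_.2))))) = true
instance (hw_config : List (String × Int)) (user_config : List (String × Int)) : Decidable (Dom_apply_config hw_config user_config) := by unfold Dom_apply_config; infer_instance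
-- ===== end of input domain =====

-- B builds the result in two staged passes (hardware entries with recognized
-- overrides substituted, then new recognized user entries appended) instead of
-- A's single in-place assignment loop; equivalence is about the RETURN value
-- only (Python B does not mutate hw_config, A does).


-- The fixed whitelist of user-configurable keys (the Python set literal).
def pvAllowed : PySem.Set String := PySem.Set.ofList
  ["sleep_enabled", "sleep_timeout", "volume", "playback_speed",
   "debounce_time", "encoder_direction_flip", "rotary_encoder",
   "encoder_navigation", "play_on_release", "show_border",
   "display_hint_text", "zoom_image_enabled", "start_menu",
   "emergency_push_enabled", "emergency_push_sound",
   "emergency_hold_enabled", "emergency_hold_seconds", "mode"]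

-- ===== PORT A =====
-- for key, val in user_config.items(): if key in allowed: hw_config[key] = val
def apply_config (hw_config : List (String × Int)) (user_config : List (String × Int)) : List (String × Int) :=
  (user_config.foldl
    (fun d p => if PySem.Set.contains pvAllowed p.1 then d.insert p.1 p.2 else d)
    (PySem.Dict.mk hw_config)).items

-- ===== PORT B =====
-- overridden = {k: (user_config[k] if k in _ALLOWED and k in user_config else v) for k, v in hw_config.items()}
-- additions  = {k: v for k, v in user_config.items() if k in _ALLOWED and k not in hw_config}
-- return {**overridden, **additions}   (disjoint keys: the merge is concatenation)
def apply_config_alt (hw_config : List (String × Int)) (user_config : List (String × Int)) : List (String × Int) :=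
  let u := PySem.Dict.mk user_config
  let h := PySem.Dict.mk hw_config
  let overridden := h.items.map (fun q =>
    if PySem.Set.contains pvAllowed q.1 && (u.get? q.1).isSome
    then (q.1, (u.get? q.1).getD 0) else q)
  let additions := u.items.filter (fun p =>
    PySem.Set.contains pvAllowed p.1 && !(h.contains p.1))
  overridden ++ additions

-- ===== PRECONDITION & SPEC =====
-- Pre_ excludes only lists whose keys repeat: they are not an encoding of a
-- Python dict (both parameters are dicts, which cannot hold a duplicate key),
-- so neither program's value there is specified by the source.
def Pre_apply_config (hw_config : List (String × Int)) (user_config : List (String × Int)) : Prop :=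
  (user_config.map Prod.fst).Nodup
instance (hw_config : List (String × Int)) (user_config : List (String × Int)) : Decidable (Pre_apply_config hw_config user_config) := by unfold Pre_apply_config; infer_instance
def pvWitness_apply_config : (List (String × Int)) × (List (String × Int)) :=
  ([("volume", 3), ("serial", 9)], [("volume", 7), ("mode", 1), ("junk", 2)])

def Spec_apply_config (hw_config : List (String × Int)) (user_config : List (String × Int)) (out : List (String × Int)) : Prop := out = apply_config_alt hw_config user_config
instance (hw_config : List (String × Int)) (user_config : List (String × Int)) (out : List (String × Int)) : Decidable (Spec_apply_config hw_config user_config out) := by unfold Spec_apply_config; infer_instance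

-- ===== CLAIM (what is proved, stated in full; the proofs are below) =====
def Claim_equal_apply_config : Prop := ∀ (hw_config : List (String × Int)) (user_config : List (String × Int)), Dom_apply_config hw_config user_config → Pre_apply_config hw_config user_config → Spec_apply_config hw_config user_config (apply_config hw_config user_config)

-- ===== LEMMAS AND PROOFS =====

-- first-match lookup in an association list (what Dict.get? does on its items)
def pvLk (l : List (String × Int)) (k : String) : Option Int :=
  (l.find? (fun p => p.1 == k)).map (·.2)

lemma pvLk_eq_none {l : List (String × Int)} {k : String}
    (h : k ∉ l.map Prod.fst) : pvLk l k = none := by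
  unfold pvLk
  rw [List.find?_eq_none.2]
  · rfl
  · intro p hp hbeq
    exact h (List.mem_map.2 ⟨p, hp, (beq_iff_eq.1 hbeq)⟩)

-- A's fold over the user items, characterized as B's two stages.
lemma pv_main (l : List (String × Int)) (d : PySem.Dict String Int)
    (hnd : (l.map Prod.fst).Nodup) :
    (l.foldl
      (fun d p => if PySem.Set.contains pvAllowed p.1 then d.insert p.1 p.2 else d)
      d).items
    = d.items.map (fun q =>
        if PySem.Set.contains pvAllowed q.1 && (pvLk l q.1).isSome
        then (q.1, (pvLk l q.1).getD 0) else q)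
      ++ l.filter (fun p =>
        PySem.Set.contains pvAllowed p.1 && !(d.contains p.1)) := by
  induction l generalizing d with
  | nil =>
    simp [pvLk]
  | cons p t ih =>
    simp only [List.map_cons, List.nodup_cons] at hnd
    obtain ⟨hp1, hndt⟩ := hnd
    have hLkNone : pvLk t p.1 = none := pvLk_eq_none hp1
    have hLkCons : ∀ k : String, k ≠ p.1 → pvLk (p :: t) k = pvLk t k := by
      intro k hk
      simp [pvLk, beq_eq_false_iff_ne.2 (fun h => hk h.symm)]
    by_cases hP : PySem.Set.contains pvAllowed p.1 = true
    · have hPm : p.1 ∈ pvAllowed := by simpa using hP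
      have hLkSelf : pvLk (p :: t) p.1 = some p.2 := by
        simp [pvLk]
      simp only [List.foldl_cons, hP, if_pos]
      by_cases hc : d.contains p.1 = true
      · rw [ih _ hndt]
        rw [PySem.Dict.items_insert_of_contains _ _ hc]
        congr 1
        · rw [List.map_map]
          apply List.map_congr_left
          intro q _
          by_cases hq : q.1 = p.1
          · simp [Function.comp, hq, hLkNone, hLkSelf, hPm]
          · have hbe : (q.1 == p.1) = false := beq_eq_false_iff_ne.2 hq
            simp [Function.comp, hbe, hLkCons q.1 hq]
        · rw [List.filter_cons_of_neg (by simp [hPm, hc])]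
          apply List.filter_congr
          intro q hq
          have hne : q.1 ≠ p.1 := by
            intro h
            exact hp1 (h ▸ List.mem_map.2 ⟨q, hq, rfl⟩)
          simp [PySem.Dict.contains_insert, beq_eq_false_iff_ne.2 hne]
      · rw [ih _ hndt]
        rw [PySem.Dict.items_insert_of_not_contains _ _ (by simpa using hc)]
        rw [List.map_append, List.filter_cons_of_pos (by simp [hPm, hc])]
        have hmap : d.items.map (fun q =>
            if PySem.Set.contains pvAllowed q.1 && (pvLk t q.1).isSome
            then (q.1, (pvLk t q.1).getD 0) else q)
          = d.items.map (fun q =>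
            if PySem.Set.contains pvAllowed q.1 && (pvLk (p :: t) q.1).isSome
            then (q.1, (pvLk (p :: t) q.1).getD 0) else q) := by
          apply List.map_congr_left
          intro q hq
          have hne : q.1 ≠ p.1 := by
            intro h
            have hq' : d.items.any (fun r => r.1 == p.1) = true :=
              List.any_eq_true.2 ⟨q, hq, by simp [h]⟩
            exact absurd hq' (by simpa [PySem.Dict.contains] using hc)
          simp [hLkCons q.1 hne]
        have hfilt : t.filter (fun q =>
              PySem.Set.contains pvAllowed q.1 && !((d.insert p.1 p.2).contains q.1))
            = t.filter (fun q =>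
              PySem.Set.contains pvAllowed q.1 && !(d.contains q.1)) := by
          apply List.filter_congr
          intro q hq
          have hne : q.1 ≠ p.1 := by
            intro h
            exact hp1 (h ▸ List.mem_map.2 ⟨q, hq, rfl⟩)
          simp [PySem.Dict.contains_insert, beq_eq_false_iff_ne.2 hne]
        have hsing : [p].map (fun q =>
            if PySem.Set.contains pvAllowed q.1 && (pvLk t q.1).isSome
            then (q.1, (pvLk t q.1).getD 0) else q) = [p] := by
          simp [hLkNone]
        rw [hmap.symm, hfilt, hsing]
        simp
    · have hPm : p.1 ∉ pvAllowed := by simpa using hP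
      simp only [List.foldl_cons, hP, if_neg, Bool.false_eq_true, not_false_iff]
      rw [ih _ hndt]
      congr 1
      · apply List.map_congr_left
        intro q _
        by_cases hq : q.1 = p.1
        · simp [hq, hPm]
        · simp [hLkCons q.1 hq]
      · rw [List.filter_cons_of_neg (by simp [hPm])]

-- ===== VERDICT (by name: the statement is the Claim_ definition above) =====
theorem apply_config_spec : Claim_equal_apply_config := by
  intro hw user _ hpre
  unfold Spec_apply_config apply_config apply_config_alt
  rw [pv_main user (PySem.Dict.mk hw) hpre]
  rfl
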